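-- pv_equiv track=rewrite | github.com/kozlyuk/planner | html_templates/number_to_text.py | thousand
-- ===== SOURCE A (Python) =====
-- units = (
--     u'нуль',
--
--     (u'один', u'одна'),
--     (u'два', u'дві'),
--
--     u'три', u'чотири', u"п'ять",
--     u'шість', u'сім', u'вісім', u"дев'ять"
-- )
--
-- teens = (
--     u'десять', u'одинадцять',
--     u'дванадцять', u'тринадцять',
--     u'чотирнадцять', u"п'ятнадцять",
--     u'шістнадцять', u'сімнадцять',
--     u'вісімнадцять', u"дев'ятнадцять"
-- )
--
-- tens = (
--     teens,
--     u'двадцять', u'тридцять',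
--     u'сорок', u"п'ятдесят",
--     u'шістдесят', u'сімдесят',
--     u'вісімдесят', u"дев'яносто"
-- )
--
-- hundreds = (
--     u'сто', u'двісті',
--     u'триста', u'чотириста',
--     u"п'ятсот", u'шістсот',
--     u'сімсот', u'вісімсот',
--     u"дев'ятсот"
-- )
--
-- def thousand(rest, sex):
--     """Converts numbers from 19 to 999"""
--     prev = 0
--     plural = 2
--     name = []
--     use_teens = rest % 100 >= 10 and rest % 100 <= 19
--     if not use_teens:
--         data = ((units, 10), (tens, 100), (hundreds, 1000))
--     else:
--         data = ((teens, 10), (hundreds, 1000))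
--     for names, x in data:
--         cur = int(((rest - prev) % x) * 10 / x)
--         prev = rest % x
--         if x == 10 and use_teens:
--             plural = 2
--             name.append(teens[cur])
--         elif cur == 0:
--             continue
--         elif x == 10:
--             name_ = names[cur]
--             if isinstance(name_, tuple):
--                 name_ = name_[0 if sex == 'm' else 1]
--             name.append(name_)
--             if cur >= 2 and cur <= 4:
--                 plural = 1
--             elif cur == 1:
--                 plural = 0
--             else:
--                 plural = 2
--         else:
--             name.append(names[cur-1])
--     return plural, name
-- ===== SOURCE B (Python) =====
-- # -*- coding: utf-8 -*-
-- units = (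
--     u'нуль',
--
--     (u'один', u'одна'),
--     (u'два', u'дві'),
--
--     u'три', u'чотири', u"п'ять",
--     u'шість', u'сім', u'вісім', u"дев'ять"
-- )
--
-- teens = (
--     u'десять', u'одинадцять',
--     u'дванадцять', u'тринадцять',
--     u'чотирнадцять', u"п'ятнадцять",
--     u'шістнадцять', u'сімнадцять',
--     u'вісімнадцять', u"дев'ятнадцять"
-- )
--
-- tens = (
--     teens,
--     u'двадцять', u'тридцять',
--     u'сорок', u"п'ятдесят",
--     u'шістдесят', u'сімдесят',
--     u'вісімдесят', u"дев'яносто"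
-- )
--
-- hundreds = (
--     u'сто', u'двісті',
--     u'триста', u'чотириста',
--     u"п'ятсот", u'шістсот',
--     u'сімсот', u'вісімсот',
--     u"дев'ятсот"
-- )
--
-- def thousand(rest, sex):
--     """Greedy decomposition of rest % 1000 against one descending value->word
--     vocabulary (roman-numeral style), instead of per-digit table logic."""
--     vocab = []
--     for i in range(9, 0, -1):
--         vocab.append((100 * i, hundreds[i - 1]))
--     for i in range(9, 1, -1):
--         vocab.append((10 * i, tens[i - 1]))
--     for i in range(19, 9, -1):
--         vocab.append((i, teens[i - 10]))
--     for i in range(9, 0, -1):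
--         w = units[i]
--         if isinstance(w, tuple):
--             w = w[0 if sex == 'm' else 1]
--         vocab.append((i, w))
--     m = rest % 1000
--     words = []
--     last = 0
--     while m:
--         for v, w in vocab:
--             if v <= m:
--                 words.append(w)
--                 m -= v
--                 last = v
--                 break
--     plural = 0 if last == 1 else (1 if 2 <= last <= 4 else 2)
--     return plural, words[::-1]
-- ===== Notes on version B (the rewrite author's own statement) =====
-- stated objective: alternative
-- what changed: B replaces A's per-digit table loop (prev accumulator, ((rest-prev)%x)*10/x float digit recovery, per-position branches) by a greedy roman-numeral-style decomposition: it builds one descending value->word vocabulary (900..100, 90..20, 19..10, 9..1) and repeatedly subtracts the largest value <= the remainder, deriving the plural form from the last (smallest) component and reversing the collected words.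
import Mathlib
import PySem

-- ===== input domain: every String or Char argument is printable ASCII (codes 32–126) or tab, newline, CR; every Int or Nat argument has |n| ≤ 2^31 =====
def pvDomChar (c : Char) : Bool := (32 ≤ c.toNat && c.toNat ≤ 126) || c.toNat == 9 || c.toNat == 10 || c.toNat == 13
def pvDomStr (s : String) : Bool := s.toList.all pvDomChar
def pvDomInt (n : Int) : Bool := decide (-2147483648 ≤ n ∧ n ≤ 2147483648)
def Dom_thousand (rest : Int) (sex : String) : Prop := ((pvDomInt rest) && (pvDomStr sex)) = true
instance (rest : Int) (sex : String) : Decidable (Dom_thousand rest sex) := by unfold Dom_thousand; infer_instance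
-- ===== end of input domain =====

-- B replaces A's per-digit table loop by a greedy decomposition against one descending
-- value->word vocabulary (roman-numeral style); objective: alternative algorithm, same cost.

-- ===== PORT A =====
-- module-level word tables (shared constants of the Python module, used by both ports)
def unitsM : List String := ["нуль","один","два","три","чотири","п'ять","шість","сім","вісім","дев'ять"]
def unitsF : List String := ["нуль","одна","дві","три","чотири","п'ять","шість","сім","вісім","дев'ять"]
def teensT : List String := ["десять","одинадцять","дванадцять","тринадцять","чотирнадцять","п'ятнадцять","шістнадцять","сімнадцять","вісімнадцять","дев'ятнадцять"]
-- tens[0] is the teens tuple in Python; that index is never read (a tens digit of 1 always takes the teens branch), so "" stands in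
def tensT : List String := ["","двадцять","тридцять","сорок","п'ятдесят","шістдесят","сімдесят","вісімдесят","дев'яносто"]
def hundredsT : List String := ["сто","двісті","триста","чотириста","п'ятсот","шістсот","сімсот","вісімсот","дев'ятсот"]

inductive NameTable | units | teens | tens | hundreds
deriving DecidableEq, Repr

-- names[i]; for units the tuple entries 1,2 are resolved by 'sex == "m"' exactly as A's isinstance branch does.
-- Default "" is never read: every index A uses is in range (Python would raise IndexError only out of range).
def tableGet (t : NameTable) (i : Int) (sex : String) : String :=
  match t with
  | .units => PySem.List.pyGetD (if sex == "m" then unitsM else unitsF) i ""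
  | .teens => PySem.List.pyGetD teensT i ""
  | .tens => PySem.List.pyGetD tensT i ""
  | .hundreds => PySem.List.pyGetD hundredsT i ""

-- literal port of A: the table-driven loop with state (prev, plural, name).
-- int(((rest - prev) % x) * 10 / x): the numerator is a non-negative exact float, so int() = floor division.
def thousand (rest : Int) (sex : String) : Int × List String :=
  let useTeens := decide (10 ≤ PySem.Int.mod rest 100 ∧ PySem.Int.mod rest 100 ≤ 19)
  let data : List (NameTable × Int) :=
    if useTeens then [(.teens, 10), (.hundreds, 1000)]
    else [(.units, 10), (.tens, 100), (.hundreds, 1000)]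
  let st := data.foldl (fun (s : Int × Int × List String) (nx : NameTable × Int) =>
    let prev := s.1; let plural := s.2.1; let name := s.2.2
    let names := nx.1; let x := nx.2
    let cur := PySem.Int.floordiv (PySem.Int.mod (rest - prev) x * 10) x
    let prev' := PySem.Int.mod rest x
    if x == 10 && useTeens then (prev', 2, name ++ [tableGet .teens cur sex])
    else if cur == 0 then (prev', plural, name)
    else if x == 10 then
      let name_ := tableGet names cur sex
      let plural' : Int := if 2 ≤ cur ∧ cur ≤ 4 then 1 else if cur == 1 then 0 else 2
      (prev', plural', name ++ [name_])
    else (prev', plural, name ++ [tableGet names (cur - 1) sex])) (0, 2, [])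
  (st.2.1, st.2.2)

-- ===== PORT B =====
-- Source B's four range loops building the descending value->word vocabulary
def vocabB (sex : String) : List (Int × String) :=
  let v1 := (PySem.List.pyRange 9 0 (-1)).foldl
    (fun acc i => acc ++ [(100 * i, PySem.List.pyGetD hundredsT (i - 1) "")]) []
  let v2 := (PySem.List.pyRange 9 1 (-1)).foldl
    (fun acc i => acc ++ [(10 * i, PySem.List.pyGetD tensT (i - 1) "")]) v1
  let v3 := (PySem.List.pyRange 19 9 (-1)).foldl
    (fun acc i => acc ++ [(i, PySem.List.pyGetD teensT (i - 10) "")]) v2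
  (PySem.List.pyRange 9 0 (-1)).foldl
    (fun acc i =>
      -- units[i]; the tuple entries 1,2 are resolved by sex == 'm' (Source B's isinstance branch)
      acc ++ [(i, PySem.List.pyGetD (if sex == "m" then unitsM else unitsF) i "")]) v3

-- Source B's 'while m:' loop: the inner for-with-break is List.find?.  Each pass subtracts at
-- least 1 from 0 ≤ m < 1000, so 1000 steps of fuel make the recursion total without changing
-- the computed value; the none branch is unreachable for m > 0 (the vocabulary contains 1).
def greedyB (vocab : List (Int × String)) : Nat → Int → List String → Int → List String × Int
  | 0, _, words, last => (words, last)
  | fuel + 1, m, words, last =>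
    if m == 0 then (words, last)
    else
      match vocab.find? (fun p => decide (p.1 ≤ m)) with
      | some (v, w) => greedyB vocab fuel (m - v) (words ++ [w]) v
      | none => (words, last)

-- the part of Source B after the vocabulary is built: mod, greedy loop, plural, reverse
def altWith (vocab : List (Int × String)) (rest : Int) : Int × List String :=
  let m := PySem.Int.mod rest 1000
  let wl := greedyB vocab 1000 m [] 0
  let plural : Int := if wl.2 == 1 then 0 else if 2 ≤ wl.2 ∧ wl.2 ≤ 4 then 1 else 2
  (plural, wl.1.reverse)

-- literal port of B (Source B): build the vocabulary, then greedy largest-value-first decomposition.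
def thousand_alt (rest : Int) (sex : String) : Int × List String :=
  let vocab := vocabB sex
  altWith vocab rest

-- ===== PRECONDITION & SPEC =====
def Spec_thousand (rest : Int) (sex : String) (out : Int × List String) : Prop := out = thousand_alt rest sex
instance (rest : Int) (sex : String) (out : Int × List String) : Decidable (Spec_thousand rest sex out) := by unfold Spec_thousand; infer_instance

-- ===== CLAIM =====
def Claim_equal_thousand : Prop := ∀ (rest : Int) (sex : String), Dom_thousand rest sex → Spec_thousand rest sex (thousand rest sex)

-- ===== LEMMAS AND PROOFS =====

-- the ports read sex only through the test sex == "m"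
lemma tableGet_sex (t : NameTable) (i : Int) (s1 s2 : String) (h : (s1 == "m") = (s2 == "m")) :
    tableGet t i s1 = tableGet t i s2 := by
  cases t <;> simp [tableGet, h]

lemma thousand_sex (rest : Int) (s1 s2 : String) (h : (s1 == "m") = (s2 == "m")) :
    thousand rest s1 = thousand rest s2 := by
  have hTG : ∀ t i, tableGet t i s1 = tableGet t i s2 := fun t i => tableGet_sex t i s1 s2 h
  simp only [thousand, hTG]

-- the vocabularies, evaluated once to literals (sex only matters through sex == "m")
def vocabLitM : List (Int × String) :=
  [(900, "дев'ятсот"), (800, "вісімсот"), (700, "сімсот"), (600, "шістсот"), (500, "п'ятсот"),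
   (400, "чотириста"), (300, "триста"), (200, "двісті"), (100, "сто"), (90, "дев'яносто"),
   (80, "вісімдесят"), (70, "сімдесят"), (60, "шістдесят"), (50, "п'ятдесят"), (40, "сорок"),
   (30, "тридцять"), (20, "двадцять"), (19, "дев'ятнадцять"), (18, "вісімнадцять"),
   (17, "сімнадцять"), (16, "шістнадцять"), (15, "п'ятнадцять"), (14, "чотирнадцять"),
   (13, "тринадцять"), (12, "дванадцять"), (11, "одинадцять"), (10, "десять"), (9, "дев'ять"),
   (8, "вісім"), (7, "сім"), (6, "шість"), (5, "п'ять"), (4, "чотири"), (3, "три"),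
   (2, "два"), (1, "один")]

def vocabLitX : List (Int × String) :=
  [(900, "дев'ятсот"), (800, "вісімсот"), (700, "сімсот"), (600, "шістсот"), (500, "п'ятсот"),
   (400, "чотириста"), (300, "триста"), (200, "двісті"), (100, "сто"), (90, "дев'яносто"),
   (80, "вісімдесят"), (70, "сімдесят"), (60, "шістдесят"), (50, "п'ятдесят"), (40, "сорок"),
   (30, "тридцять"), (20, "двадцять"), (19, "дев'ятнадцять"), (18, "вісімнадцять"),
   (17, "сімнадцять"), (16, "шістнадцять"), (15, "п'ятнадцять"), (14, "чотирнадцять"),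
   (13, "тринадцять"), (12, "дванадцять"), (11, "одинадцять"), (10, "десять"), (9, "дев'ять"),
   (8, "вісім"), (7, "сім"), (6, "шість"), (5, "п'ять"), (4, "чотири"), (3, "три"),
   (2, "дві"), (1, "одна")]

lemma vocabB_eq (sex : String) : vocabB sex = if sex == "m" then vocabLitM else vocabLitX := by
  by_cases h : (sex == "m") = true
  · have : vocabB sex = vocabB "m" := by simp only [vocabB, h]; rfl
    rw [this, h, if_pos rfl]; decide
  · have hb := Bool.eq_false_iff.mpr h
    have : vocabB sex = vocabB "x" := by simp only [vocabB, hb]; rfl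
    rw [this, hb]; decide

-- Python's % with a positive divisor is emod; two arguments congruent mod b have equal PySem.Int.mod
lemma pymod_eq (a b : Int) (c : Int) (h : 0 < b) (h2 : a % b = c % b) :
    PySem.Int.mod a b = PySem.Int.mod c b := by
  rw [PySem.Int.mod_eq_emod_of_pos h, PySem.Int.mod_eq_emod_of_pos h]; omega

-- both ports depend on rest only through rest % 1000
lemma thousand_mod (rest : Int) (sex : String) :
    thousand rest sex = thousand (rest % 1000) sex := by
  have h100 : PySem.Int.mod rest 100 = PySem.Int.mod (rest % 1000) 100 := pymod_eq _ _ _ (by norm_num) (by omega)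
  have g10 : ∀ p : Int, PySem.Int.mod (rest - p) 10 = PySem.Int.mod (rest % 1000 - p) 10 :=
    fun p => pymod_eq _ _ _ (by norm_num) (by omega)
  have g100 : ∀ p : Int, PySem.Int.mod (rest - p) 100 = PySem.Int.mod (rest % 1000 - p) 100 :=
    fun p => pymod_eq _ _ _ (by norm_num) (by omega)
  have g1000 : ∀ p : Int, PySem.Int.mod (rest - p) 1000 = PySem.Int.mod (rest % 1000 - p) 1000 :=
    fun p => pymod_eq _ _ _ (by norm_num) (by omega)
  have p1 : PySem.Int.mod rest 10 = PySem.Int.mod (rest % 1000) 10 := pymod_eq _ _ _ (by norm_num) (by omega)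
  have p3 : PySem.Int.mod rest 1000 = PySem.Int.mod (rest % 1000) 1000 := pymod_eq _ _ _ (by norm_num) (by omega)
  simp only [thousand, h100]
  cases hb : decide (10 ≤ PySem.Int.mod (rest % 1000) 100 ∧ PySem.Int.mod (rest % 1000) 100 ≤ 19) <;>
    simp only [hb, Bool.and_true, Bool.and_false, Bool.false_eq_true, if_false, eq_self_iff_true, if_true,
      Int.reduceBEq, List.foldl, g10, g100, g1000, p1, h100, p3]

lemma altWith_mod (vocab : List (Int × String)) (rest : Int) :
    altWith vocab rest = altWith vocab (rest % 1000) := by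
  have h : PySem.Int.mod rest 1000 = PySem.Int.mod (rest % 1000) 1000 := pymod_eq _ _ _ (by norm_num) (by omega)
  simp only [altWith, h]

-- finite check over the residue 0..999 and the two classes of sex
set_option maxRecDepth 80000 in
set_option maxHeartbeats 4000000 in
lemma main_nat : ∀ n : Nat, n < 1000 → ∀ b : Bool,
    thousand (n : Int) (if b then "m" else "x") = altWith (if b then vocabLitM else vocabLitX) (n : Int) := by
  decide

-- ===== VERDICT =====
theorem thousand_spec : Claim_equal_thousand := by
  intro rest sex _
  unfold Spec_thousand
  have h0 : (0:Int) ≤ rest % 1000 := Int.emod_nonneg rest (by norm_num)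
  have h1 : rest % 1000 < 1000 := Int.emod_lt_of_pos rest (by norm_num)
  have hn : rest % 1000 = ((rest % 1000).toNat : Int) := (Int.toNat_of_nonneg h0).symm
  have hlt : (rest % 1000).toNat < 1000 := by omega
  show thousand rest sex = altWith (vocabB sex) rest
  rw [vocabB_eq]
  by_cases hb : (sex == "m") = true
  · rw [thousand_sex rest sex "m" (by rw [hb]; rfl), hb, if_pos rfl,
      thousand_mod, altWith_mod, hn]
    simpa using main_nat _ hlt true
  · rw [thousand_sex rest sex "x" (by rw [Bool.eq_false_iff.mpr hb]; rfl),
      Bool.eq_false_iff.mpr hb, if_neg (by simp),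
      thousand_mod, altWith_mod, hn]
    simpa using main_nat _ hlt false
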